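-- pv_equiv track=rewrite | github.com/YogeLiu/api_tool | test.py | analyze_path_duplicates
-- ===== SOURCE A (Python) =====
-- def analyze_path_duplicates(data):
--     """
--     检查路径是否有重复（仅当 handler 相同时）：
--     1. 完全相等
--     2. 一个是另一个的后缀（尾部完全相同）
--     且：两个路由的 handler 必须相同
--     """
--     routes = data.get("routes", [])
--
--     # 存储每个路由的信息：path, segments, handler
--     route_list = []
--     for route in routes:
--         path = route["path"]
--         handler = route.get("handler", "")
--         segments = [s for s in path.strip("/").split("/") if s]
--         route_list.append({"path": path, "segments": segments, "handler": handler})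
--
--     duplicates = []  # 存储重复对
--
--     n = len(route_list)
--     for i in range(n):
--         for j in range(i + 1, n):
--             r1 = route_list[i]
--             r2 = route_list[j]
--
--             # 只有当 handler 相同时才判断路径重复
--             if r1["handler"] != r2["handler"]:
--                 continue
--
--             seg1, seg2 = r1["segments"], r2["segments"]
--             path1, path2 = r1["path"], r2["path"]
--
--             if seg1 == seg2:
--                 # 完全相等
--                 duplicates.append((path1, path2, "完全相等", r1["handler"]))
--             elif len(seg1) > len(seg2) and seg1[-len(seg2) :] == seg2:
--                 # seg2 是 seg1 的后缀
--                 duplicates.append((path1, path2, f"后缀匹配: {path2} 是 {path1} 的尾部", r1["handler"]))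
--             elif len(seg2) > len(seg1) and seg2[-len(seg1) :] == seg1:
--                 # seg1 是 seg2 的后缀
--                 duplicates.append((path1, path2, f"后缀匹配: {path1} 是 {path2} 的尾部", r1["handler"]))
--
--     return duplicates
-- ===== SOURCE B (Python) =====
-- def _classify(p1, s1, p2, s2, h):
--     l1, l2 = len(s1), len(s2)
--     if l1 == l2:
--         return (p1, p2, "完全相等", h) if s1 == s2 else None
--     if l1 > l2:
--         return (p1, p2, f"后缀匹配: {p2} 是 {p1} 的尾部", h) if s1[-l2:] == s2 else None
--     return (p1, p2, f"后缀匹配: {p1} 是 {p2} 的尾部", h) if s2[-l1:] == s1 else None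
--
--
-- def _pairs_within(members, n):
--     out = []
--     rest = members
--     while rest:
--         i, p1, s1, h = rest[0]
--         rest = rest[1:]
--         for j, p2, s2, _ in rest:
--             t = _classify(p1, s1, p2, s2, h)
--             if t is not None:
--                 out.append((i * n + j, t))
--     return out
--
--
-- def analyze_path_duplicates(data):
--     routes = data.get("routes", [])
--     infos = [(idx, route["path"],
--               [s for s in route["path"].strip("/").split("/") if s],
--               route.get("handler", ""))
--              for idx, route in enumerate(routes)]
--     groups = {}
--     for info in infos:
--         groups.setdefault(info[3], []).append(info)
--     n = len(infos)
--     keyed = []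
--     for members in groups.values():
--         keyed += _pairs_within(members, n)
--     keyed.sort(key=lambda kv: kv[0])
--     return [t for _, t in keyed]
-- ===== Notes on version B (the rewrite author's own statement) =====
-- stated objective: alternative
-- what changed: B groups routes by handler in one dict pass and only compares pairs inside each group, keying every match with i*n+j and sorting the keyed matches to restore A's nested-loop pair order, instead of A's scan over all O(n^2) route pairs with a handler check in the inner loop.
import Mathlib
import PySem

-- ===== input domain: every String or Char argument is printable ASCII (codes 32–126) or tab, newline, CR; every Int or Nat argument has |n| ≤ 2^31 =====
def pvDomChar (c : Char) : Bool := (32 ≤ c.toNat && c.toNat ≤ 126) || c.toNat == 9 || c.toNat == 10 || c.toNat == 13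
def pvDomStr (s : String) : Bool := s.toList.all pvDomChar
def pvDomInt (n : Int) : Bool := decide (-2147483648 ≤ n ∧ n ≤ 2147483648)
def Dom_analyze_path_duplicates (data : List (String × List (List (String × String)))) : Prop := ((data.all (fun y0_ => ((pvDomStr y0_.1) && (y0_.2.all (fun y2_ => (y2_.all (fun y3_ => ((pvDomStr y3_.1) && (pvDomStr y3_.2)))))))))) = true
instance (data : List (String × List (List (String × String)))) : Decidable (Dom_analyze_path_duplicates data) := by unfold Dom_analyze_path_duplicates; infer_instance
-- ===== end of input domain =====

-- B replaces A's all-pairs scan by hashing the routes into handler groups, keying each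
-- in-group match with i*n+j and sorting the keyed matches back into A's pair order.

-- f-string "后缀匹配: {a} 是 {b} 的尾部" (shared literal formatting, used by both ports)
def pvSufMsg (a b : String) : String :=
  PySem.Str.join "" ["后缀匹配: ", a, " 是 ", b, " 的尾部"]

-- per-route record of A's route_list: (path, segments, handler)
def pvRouteInfo (route : List (String × String)) : String × List String × String :=
  let path := ((PySem.Dict.mk route).get? "path").getD ""   -- route["path"]; KeyError = none, excluded by Pre_
  let handler := (PySem.Dict.mk route).getD "handler" ""
  let segments := ((PySem.Str.split? (PySem.Str.stripChars path "/") "/").getD []).filter (fun s => decide (s ≠ ""))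
  (path, segments, handler)

-- ===== PORT A =====
def analyze_path_duplicates (data : List (String × List (List (String × String)))) : List (String × String × String × String) :=
  let routes := (PySem.Dict.mk data).getD "routes" []
  let route_list := routes.foldl (fun acc route => acc ++ [pvRouteInfo route]) []
  let n : Int := route_list.length
  (PySem.List.pyRange 0 n).foldl (fun dups i =>
    (PySem.List.pyRange (i+1) n).foldl (fun dups j =>
      let r1 := PySem.List.pyGetD route_list i ("", [], "")
      let r2 := PySem.List.pyGetD route_list j ("", [], "")
      if r1.2.2 ≠ r2.2.2 then dups
      else if r1.2.1 = r2.2.1 then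
        dups ++ [(r1.1, r2.1, "完全相等", r1.2.2)]
      else if r1.2.1.length > r2.2.1.length ∧
          PySem.List.slice r1.2.1 (some (-(r2.2.1.length : Int))) none = r2.2.1 then
        dups ++ [(r1.1, r2.1, pvSufMsg r2.1 r1.1, r1.2.2)]
      else if r2.2.1.length > r1.2.1.length ∧
          PySem.List.slice r2.2.1 (some (-(r1.2.1.length : Int))) none = r1.2.1 then
        dups ++ [(r1.1, r2.1, pvSufMsg r1.1 r2.1, r1.2.2)]
      else dups) dups) []

-- ===== PORT B =====
-- _classify(p1, s1, p2, s2, h)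
def pvClassify (p1 : String) (s1 : List String) (p2 : String) (s2 : List String) (h : String) :
    Option (String × String × String × String) :=
  let l1 := s1.length
  let l2 := s2.length
  if l1 = l2 then
    (if s1 = s2 then some (p1, p2, "完全相等", h) else none)
  else if l1 > l2 then
    (if PySem.List.slice s1 (some (-(l2 : Int))) none = s2 then some (p1, p2, pvSufMsg p2 p1, h) else none)
  else
    (if PySem.List.slice s2 (some (-(l1 : Int))) none = s1 then some (p1, p2, pvSufMsg p1 p2, h) else none)

-- _pairs_within(members, n): while-loop over 'rest', accumulating 'out'
def pvPairsWithin (n : Int) (out : List (Int × (String × String × String × String))) :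
    List (Int × String × List String × String) → List (Int × (String × String × String × String))
  | [] => out
  | first :: rest =>
      pvPairsWithin n
        (rest.foldl (fun out other =>
          match pvClassify first.2.1 first.2.2.1 other.2.1 other.2.2.1 first.2.2.2 with
          | some t => out ++ [(first.1 * n + other.1, t)]
          | none => out) out) rest

def analyze_path_duplicates_alt (data : List (String × List (List (String × String)))) : List (String × String × String × String) :=
  let routes := (PySem.Dict.mk data).getD "routes" []
  let infos := (PySem.List.enumerate routes 0).map (fun p => (p.1, pvRouteInfo p.2))
  let groups := infos.foldl (fun d info => d.modify info.2.2.2 [] (· ++ [info])) (PySem.Dict.empty)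
  let n : Int := infos.length
  let keyed := (PySem.Dict.values groups).foldl (fun keyed members => keyed ++ pvPairsWithin n [] members) []
  (PySem.List.sorted keyed (fun kv => kv.1)).map (fun kv => kv.2)

-- ===== PRECONDITION & SPEC =====
-- Pre_ excludes exactly the inputs where some route dict lacks the "path" key: there A raises KeyError.
def Pre_analyze_path_duplicates (data : List (String × List (List (String × String)))) : Prop :=
  ∀ route ∈ (PySem.Dict.mk data).getD "routes" [], ((PySem.Dict.mk route).get? "path").isSome = true
instance (data : List (String × List (List (String × String)))) : Decidable (Pre_analyze_path_duplicates data) := by unfold Pre_analyze_path_duplicates; infer_instance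
def pvWitness_analyze_path_duplicates : (List (String × List (List (String × String)))) :=
  [("routes", [[("path", "/a/b"), ("handler", "h")], [("path", "b"), ("handler", "h")]])]

def Spec_analyze_path_duplicates (data : List (String × List (List (String × String)))) (out : List (String × String × String × String)) : Prop := out = analyze_path_duplicates_alt data
instance (data : List (String × List (List (String × String)))) (out : List (String × String × String × String)) : Decidable (Spec_analyze_path_duplicates data out) := by unfold Spec_analyze_path_duplicates; infer_instance

-- ===== CLAIM (what is proved, stated in full; the proofs are below) =====
def Claim_equal_analyze_path_duplicates : Prop := ∀ (data : List (String × List (List (String × String)))), Dom_analyze_path_duplicates data → Pre_analyze_path_duplicates data → Spec_analyze_path_duplicates data (analyze_path_duplicates data)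

-- ===== LEMMAS AND PROOFS =====

-- ---- proof-side abbreviations ----
def pvRl (data : List (String × List (List (String × String)))) : List (String × List String × String) :=
  ((PySem.Dict.mk data).getD "routes" []).map pvRouteInfo

def pvE (data : List (String × List (List (String × String)))) : List (Int × String × List String × String) :=
  PySem.List.enumerate (pvRl data) 0

def pvHd (x : Int × String × List String × String) : String := x.2.2.2

def pvPairs {α : Type} : List α → List (α × α)
  | [] => []
  | x :: xs => xs.map (fun y => (x, y)) ++ pvPairs xs

def pvStepB (n : Int) (p q : Int × String × List String × String) :
    Option (Int × (String × String × String × String)) :=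
  (pvClassify p.2.1 p.2.2.1 q.2.1 q.2.2.1 p.2.2.2).map (fun t => (p.1 * n + q.1, t))

def pvStepA (n : Int) (p q : Int × String × List String × String) :
    Option (Int × (String × String × String × String)) :=
  if p.2.2.2 ≠ q.2.2.2 then none
  else if p.2.2.1 = q.2.2.1 then
    some (p.1 * n + q.1, (p.2.1, q.2.1, "完全相等", p.2.2.2))
  else if p.2.2.1.length > q.2.2.1.length ∧
      PySem.List.slice p.2.2.1 (some (-(q.2.2.1.length : Int))) none = q.2.2.1 then
    some (p.1 * n + q.1, (p.2.1, q.2.1, pvSufMsg q.2.1 p.2.1, p.2.2.2))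
  else if q.2.2.1.length > p.2.2.1.length ∧
      PySem.List.slice q.2.2.1 (some (-(p.2.2.1.length : Int))) none = p.2.2.1 then
    some (p.1 * n + q.1, (p.2.1, q.2.1, pvSufMsg p.2.1 q.2.1, p.2.2.2))
  else none

-- ---- generic list lemmas ----
theorem pvFoldlMatch {α β : Type} (f : α → Option β) (l : List α) (acc : List β) :
    l.foldl (fun acc x => match f x with | some t => acc ++ [t] | none => acc) acc
      = acc ++ l.filterMap f := by
  induction l generalizing acc with
  | nil => simp
  | cons x xs ih =>
    cases h : f x <;> simp [List.foldl_cons, h, ih]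

theorem pvFilterMap_if {α β : Type} (c : α → Bool) (f g : α → Option β) (l : List α)
    (h : ∀ x ∈ l, f x = if c x then g x else none) :
    l.filterMap f = (l.filter c).filterMap g := by
  induction l with
  | nil => simp
  | cons x xs ih =>
    have hx := h x (List.mem_cons_self ..)
    have ihx := ih (fun y hy => h y (List.mem_cons_of_mem _ hy))
    by_cases hc : c x = true
    · simp [List.filterMap_cons, hx, hc, ihx]
    · simp only [Bool.not_eq_true] at hc
      simp [hc, hx, ihx]

theorem pvFilterMap_flatMap {α β γ : Type} (l : List α) (g : α → List β) (f : β → Option γ) :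
    (l.flatMap g).filterMap f = l.flatMap (fun x => (g x).filterMap f) := by
  induction l with
  | nil => simp
  | cons x xs ih => simp [List.flatMap_cons, List.filterMap_append, ih]

theorem pvMem_pairs {α : Type} {l : List α} {p : α × α} (hp : p ∈ pvPairs l) :
    p.1 ∈ l ∧ p.2 ∈ l := by
  induction l with
  | nil => simp [pvPairs] at hp
  | cons x xs ih =>
    simp only [pvPairs, List.mem_append, List.mem_map] at hp
    rcases hp with ⟨y, hy, rfl⟩ | hp
    · exact ⟨List.mem_cons_self .., List.mem_cons_of_mem _ hy⟩
    · exact ⟨List.mem_cons_of_mem _ (ih hp).1, List.mem_cons_of_mem _ (ih hp).2⟩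

theorem pvNodup_pairs {α : Type} {l : List α} (h : l.Nodup) : (pvPairs l).Nodup := by
  induction l with
  | nil => simp [pvPairs]
  | cons x xs ih =>
    rcases List.nodup_cons.mp h with ⟨hx, hxs⟩
    refine List.Nodup.append ?_ (ih hxs) ?_
    · exact hxs.map (fun a b hab => by simpa using congrArg Prod.snd hab)
    · intro p hp hp2
      rcases List.mem_map.mp hp with ⟨y, _, rfl⟩
      exact hx ((pvMem_pairs hp2).1)

theorem pvPairs_filter {α : Type} (c : α → Bool) {l : List α} (hnd : l.Nodup) (p : α × α) :
    p ∈ pvPairs (l.filter c) ↔ p ∈ pvPairs l ∧ c p.1 ∧ c p.2 := by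
  induction l with
  | nil => simp [pvPairs]
  | cons x xs ih =>
    rcases List.nodup_cons.mp hnd with ⟨hx, hxs⟩
    have ih' := ih hxs
    by_cases hc : c x = true
    · rw [List.filter_cons_of_pos hc]
      simp only [pvPairs, List.mem_append, List.mem_map, List.mem_filter, ih']
      constructor
      · rintro (⟨y, ⟨hy, hcy⟩, rfl⟩ | ⟨hp, h1, h2⟩)
        · exact ⟨Or.inl ⟨y, hy, rfl⟩, hc, hcy⟩
        · exact ⟨Or.inr hp, h1, h2⟩
      · rintro ⟨⟨y, hy, rfl⟩ | hp, h1, h2⟩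
        · exact Or.inl ⟨y, ⟨hy, h2⟩, rfl⟩
        · exact Or.inr ⟨hp, h1, h2⟩
    · simp only [Bool.not_eq_true] at hc
      rw [List.filter_cons_of_neg (by simp [hc])]
      simp only [pvPairs, List.mem_append, List.mem_map, ih']
      constructor
      · rintro ⟨hp, h1, h2⟩
        exact ⟨Or.inr hp, h1, h2⟩
      · rintro ⟨⟨y, hy, rfl⟩ | hp, h1, h2⟩
        · simp [hc] at h1
        · exact ⟨hp, h1, h2⟩

theorem pvEnumerate_map {α β : Type} (f : α → β) (l : List α) (s : Int) :
    PySem.List.enumerate (l.map f) s = (PySem.List.enumerate l s).map (fun p => (p.1, f p.2)) := by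
  induction l generalizing s with
  | nil => simp [PySem.List.enumerate_nil]
  | cons x xs ih => simp [PySem.List.enumerate_cons, ih]

theorem pvRangePairs {α β : Type} (F : α → α → Option β) (L : List α) (get : Int → α)
    (hget : ∀ (k : Nat) (h : k < L.length), get k = L[k]) :
    (PySem.List.pyRange 0 (L.length : Int)).flatMap
        (fun i => (L.drop (i + 1).toNat).filterMap (fun q => F (get i) q))
      = (pvPairs L).filterMap (fun pq => F pq.1 pq.2) := by
  induction L generalizing get with
  | nil => simp [pvPairs, PySem.List.pyRange_one_eq_nil]
  | cons x xs ih =>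
    have hx : get 0 = x := by simpa using hget 0 (by simp)
    have hcons : PySem.List.pyRange 0 ((x :: xs).length : Int)
        = 0 :: PySem.List.pyRange 1 ((x :: xs).length : Int) := by
      apply PySem.List.pyRange_one_cons
      simp only [List.length_cons]
      push_cast
      omega
    rw [hcons, List.flatMap_cons]
    have hrest : (PySem.List.pyRange 1 ((x :: xs).length : Int)).flatMap
        (fun i => ((x :: xs).drop (i + 1).toNat).filterMap (fun q => F (get i) q))
        = (PySem.List.pyRange 0 ((xs).length : Int)).flatMap
          (fun i => (xs.drop (i + 1).toNat).filterMap (fun q => F ((fun j => get (1 + j)) i) q)) := by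
      rw [PySem.List.pyRange_one, PySem.List.pyRange_one]
      have h1 : (((x :: xs).length : Int) - 1).toNat = xs.length := by
        simp only [List.length_cons]; push_cast; omega
      have h2 : (((xs).length : Int) - 0).toNat = xs.length := by omega
      rw [h1, h2, List.flatMap_map, List.flatMap_map]
      congr 1
      funext k
      have e1 : ((1 : Int) + (k : Int) + 1).toNat = k + 2 := by omega
      have e2 : ((0 : Int) + (k : Int) + 1).toNat = k + 1 := by omega
      rw [e1, e2]
      show _ = List.filterMap (fun q => F (get (1 + (0 + (k : Int)))) q) (List.drop (k + 1) xs)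
      have e3 : (1 : Int) + (0 + (k : Int)) = 1 + (k : Int) := by omega
      rw [e3, List.drop_succ_cons]
    rw [hrest, ih (fun j => get (1 + j)) ?hget]
    case hget =>
      intro k hk
      show get (1 + (k : Int)) = xs[k]
      have : (1 : Int) + (k : Int) = ((k + 1 : Nat) : Int) := by push_cast; omega
      rw [this, hget (k + 1) (by simpa using Nat.succ_lt_succ hk)]
      simp
    show ((x :: xs).drop 1).filterMap (fun q => F (get 0) q) ++ _ = _
    rw [hx]
    simp only [pvPairs, List.filterMap_append, List.drop_one, List.tail_cons]
    congr 1
    rw [List.filterMap_map]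
    rfl

theorem pvRangeFilterMapIdx {α β : Type} (rl : List α) (d : α)
    (G : Int × α → Option β) (a : Int) (ha : 0 ≤ a) :
    (PySem.List.pyRange a (rl.length : Int)).filterMap (fun j => G (j, PySem.List.pyGetD rl j d))
      = ((PySem.List.enumerate rl 0).drop a.toNat).filterMap G := by
  have hmap : (PySem.List.pyRange a (rl.length : Int)).map (fun j => (j, PySem.List.pyGetD rl j d))
      = (PySem.List.enumerate rl 0).drop a.toNat := by
    have h0 := PySem.List.map_pyGetD_pyRange (PySem.List.enumerate rl 0) ((-1 : Int), d) (a := a) ha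
    rw [← h0]
    have hlen : PySem.List.len (PySem.List.enumerate rl 0) = (rl.length : Int) := by
      simp [PySem.List.length_enumerate]
    rw [hlen]
    apply List.map_congr_left
    intro j hj
    rcases PySem.List.mem_pyRange_one.mp hj with ⟨hj1, hj2⟩
    have hj0 : 0 ≤ j := le_trans ha hj1
    obtain ⟨k, rfl⟩ : ∃ k : Nat, j = (k : Int) := ⟨j.toNat, (Int.toNat_of_nonneg hj0).symm⟩
    have hk : k < rl.length := by exact_mod_cast hj2
    have hkE : k < (PySem.List.enumerate rl 0).length := by
      rwa [PySem.List.length_enumerate]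
    rw [PySem.List.pyGetD_natCast, PySem.List.pyGetD_natCast,
      List.getD_eq_getElem _ _ hk, List.getD_eq_getElem _ _ hkE,
      PySem.List.getElem_enumerate]
    simp
  rw [← hmap, List.filterMap_map]
  rfl

-- ---- step equivalence ----
theorem pvStep_eq (n : Int) (p q : Int × String × List String × String) :
    pvStepA n p q = if pvHd p == pvHd q then pvStepB n p q else none := by
  unfold pvStepA pvStepB pvClassify pvHd
  by_cases hh : p.2.2.2 = q.2.2.2
  · by_cases hs : p.2.2.1 = q.2.2.1
    · simp [hh, hs]
    · by_cases hl : p.2.2.1.length = q.2.2.1.length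
      · simp [hh, hs, hl]
      · by_cases hgt : p.2.2.1.length > q.2.2.1.length
        · have : ¬ q.2.2.1.length > p.2.2.1.length := by omega
          by_cases hsl : PySem.List.slice p.2.2.1 (some (-(q.2.2.1.length : Int))) none = q.2.2.1 <;>
            simp [hh, hs, hl, hgt, this, hsl]
        · have hlt : q.2.2.1.length > p.2.2.1.length := by omega
          by_cases hsl : PySem.List.slice q.2.2.1 (some (-(p.2.2.1.length : Int))) none = p.2.2.1 <;>
            simp [hh, hs, hl, hgt, hlt, hsl]
  · simp [hh]

theorem pvStepA_key {n : Int} {p q : Int × String × List String × String}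
    {kv : Int × (String × String × String × String)} (h : pvStepA n p q = some kv) :
    kv.1 = p.1 * n + q.1 := by
  unfold pvStepA at h
  split_ifs at h <;> simp [← Option.some_inj.mp h]

-- ---- the permutation core ----
theorem pvPerm {α κ : Type} [BEq κ] [LawfulBEq κ] (hd : α → κ) (l : List α) (hnd : l.Nodup) :
    ((PySem.Set.ofList (l.map hd)).flatMap (fun c => pvPairs (l.filter (fun x => hd x == c)))).Perm
      ((pvPairs l).filter (fun pq => hd pq.1 == hd pq.2)) := by
  have hmemG : ∀ (c : κ) (p : α × α), p ∈ pvPairs (l.filter (fun x => hd x == c)) →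
      hd p.1 = c ∧ hd p.2 = c := by
    intro c p hp
    have h1 := (pvMem_pairs hp).1
    have h2 := (pvMem_pairs hp).2
    exact ⟨by simpa using (List.mem_filter.mp h1).2, by simpa using (List.mem_filter.mp h2).2⟩
  apply (List.perm_ext_iff_of_nodup ?_ ?_).mpr
  · intro p
    simp only [List.mem_flatMap, PySem.Set.mem_ofList, List.mem_map, List.mem_filter,
      pvPairs_filter _ hnd]
    constructor
    · rintro ⟨c, _, hp, h1, h2⟩
      exact ⟨hp, by simp only [beq_iff_eq] at h1 h2 ⊢; rw [h1, h2]⟩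
    · rintro ⟨hp, he⟩
      refine ⟨hd p.1, ⟨p.1, (pvMem_pairs hp).1, rfl⟩, hp, by simp, ?_⟩
      simp only [beq_iff_eq] at he ⊢
      exact he.symm
  · apply List.nodup_flatMap.mpr
    refine ⟨fun c _ => pvNodup_pairs (hnd.filter _), ?_⟩
    have := PySem.Set.nodup_ofList (l.map hd)
    refine this.imp ?_
    intro c c' hne p hp hp'
    exact hne (((hmemG c p hp).1).symm.trans ((hmemG c' p hp').1))
  · exact (pvNodup_pairs hnd).filter _

-- ---- key ordering ----
theorem pvPairwiseKey (n : Int) (L : List (Int × String × List String × String))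
    (hb : ∀ x ∈ L, 0 ≤ x.1 ∧ x.1 < n) (hp : L.Pairwise (fun a b => a.1 < b.1)) :
    (pvPairs L).Pairwise (fun p q => p.1.1 * n + p.2.1 < q.1.1 * n + q.2.1) := by
  induction L with
  | nil => simp [pvPairs]
  | cons x xs ih =>
    rcases List.pairwise_cons.mp hp with ⟨hx, hp'⟩
    have hbx := hb x (List.mem_cons_self ..)
    have hb' : ∀ y ∈ xs, 0 ≤ y.1 ∧ y.1 < n := fun y hy => hb y (List.mem_cons_of_mem _ hy)
    simp only [pvPairs, List.pairwise_append, List.pairwise_map]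
    refine ⟨hp'.imp (fun {a b} hab => by have := hab; linarith), ih hb' hp', ?_⟩
    intro a ha b hbp
    rcases List.mem_map.mp ha with ⟨y, hy, rfl⟩
    have h1 : x.1 < b.1.1 := hx _ (pvMem_pairs hbp).1
    have h2 := hb' _ (pvMem_pairs hbp).2
    have h3 := hb' _ hy
    have h4 := hb' _ (pvMem_pairs hbp).1
    have key : (x.1 + 1) * n ≤ b.1.1 * n :=
      mul_le_mul_of_nonneg_right (by omega) (by omega)
    nlinarith [key]

theorem pvFlatMap_congr {α β : Type} {f g : α → List β} {l : List α}
    (h : ∀ a ∈ l, f a = g a) : l.flatMap f = l.flatMap g := by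
  induction l with
  | nil => rfl
  | cons x xs ih =>
    simp only [List.flatMap_cons, h x (List.mem_cons_self ..),
      ih (fun a ha => h a (List.mem_cons_of_mem _ ha))]

theorem pvPairsWithin_eq (n : Int) (l : List (Int × String × List String × String))
    (out : List (Int × (String × String × String × String))) :
    pvPairsWithin n out l = out ++ (pvPairs l).filterMap (fun pq => pvStepB n pq.1 pq.2) := by
  induction l generalizing out with
  | nil => simp [pvPairsWithin, pvPairs]
  | cons first rest ih =>
    rw [pvPairsWithin, ih]
    have hfold : rest.foldl (fun out other =>
        match pvClassify first.2.1 first.2.2.1 other.2.1 other.2.2.1 first.2.2.2 with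
        | some t => out ++ [(first.1 * n + other.1, t)]
        | none => out) out
        = out ++ rest.filterMap (fun other => pvStepB n first other) := by
      rw [← pvFoldlMatch (fun other => pvStepB n first other) rest out]
      apply List.foldl_ext
      intro acc other _
      unfold pvStepB
      cases pvClassify first.2.1 first.2.2.1 other.2.1 other.2.2.1 first.2.2.2 <;> rfl
    rw [hfold]
    simp only [pvPairs, List.filterMap_append, List.append_assoc]
    congr 2
    rw [List.filterMap_map]
    rfl

-- ---- characterizations of the two ports ----
theorem pvA_loop (rl : List (String × List String × String)) :
    (PySem.List.pyRange 0 (rl.length : Int)).foldl (fun dups i =>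
      (PySem.List.pyRange (i+1) (rl.length : Int)).foldl (fun dups j =>
        let r1 := PySem.List.pyGetD rl i ("", [], "")
        let r2 := PySem.List.pyGetD rl j ("", [], "")
        if r1.2.2 ≠ r2.2.2 then dups
        else if r1.2.1 = r2.2.1 then
          dups ++ [(r1.1, r2.1, "完全相等", r1.2.2)]
        else if r1.2.1.length > r2.2.1.length ∧
            PySem.List.slice r1.2.1 (some (-(r2.2.1.length : Int))) none = r2.2.1 then
          dups ++ [(r1.1, r2.1, pvSufMsg r2.1 r1.1, r1.2.2)]
        else if r2.2.1.length > r1.2.1.length ∧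
            PySem.List.slice r2.2.1 (some (-(r1.2.1.length : Int))) none = r1.2.1 then
          dups ++ [(r1.1, r2.1, pvSufMsg r1.1 r2.1, r1.2.2)]
        else dups) dups) []
    = ((pvPairs (PySem.List.enumerate rl 0)).filterMap
        (fun pq => pvStepA (rl.length : Int) pq.1 pq.2)).map (fun kv => kv.2) := by
  have hinner : ∀ (i : Int) (dups : List (String × String × String × String)),
      (PySem.List.pyRange (i+1) (rl.length : Int)).foldl (fun dups j =>
        let r1 := PySem.List.pyGetD rl i ("", [], "")
        let r2 := PySem.List.pyGetD rl j ("", [], "")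
        if r1.2.2 ≠ r2.2.2 then dups
        else if r1.2.1 = r2.2.1 then
          dups ++ [(r1.1, r2.1, "完全相等", r1.2.2)]
        else if r1.2.1.length > r2.2.1.length ∧
            PySem.List.slice r1.2.1 (some (-(r2.2.1.length : Int))) none = r2.2.1 then
          dups ++ [(r1.1, r2.1, pvSufMsg r2.1 r1.1, r1.2.2)]
        else if r2.2.1.length > r1.2.1.length ∧
            PySem.List.slice r2.2.1 (some (-(r1.2.1.length : Int))) none = r1.2.1 then
          dups ++ [(r1.1, r2.1, pvSufMsg r1.1 r2.1, r1.2.2)]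
        else dups) dups
      = dups ++ ((PySem.List.pyRange (i+1) (rl.length : Int)).filterMap
          (fun j => pvStepA (rl.length : Int)
            (i, PySem.List.pyGetD rl i ("", [], "")) (j, PySem.List.pyGetD rl j ("", [], "")))).map
          (fun kv => kv.2) := by
    intro i dups
    rw [List.map_filterMap,
      ← pvFoldlMatch (fun j => (pvStepA (rl.length : Int)
        (i, PySem.List.pyGetD rl i ("", [], "")) (j, PySem.List.pyGetD rl j ("", [], ""))).map
        (fun kv => kv.2))]
    apply List.foldl_ext
    intro acc j _
    simp only [pvStepA]
    split_ifs <;> rfl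
  calc _ = (PySem.List.pyRange 0 (rl.length : Int)).foldl (fun dups i => dups ++
        ((PySem.List.pyRange (i+1) (rl.length : Int)).filterMap
          (fun j => pvStepA (rl.length : Int)
            (i, PySem.List.pyGetD rl i ("", [], "")) (j, PySem.List.pyGetD rl j ("", [], "")))).map
          (fun kv => kv.2)) [] := by
        apply List.foldl_ext
        intro acc i _
        exact hinner i acc
    _ = ((PySem.List.pyRange 0 (rl.length : Int)).flatMap (fun i =>
          (PySem.List.pyRange (i+1) (rl.length : Int)).filterMap
          (fun j => pvStepA (rl.length : Int)
            (i, PySem.List.pyGetD rl i ("", [], "")) (j, PySem.List.pyGetD rl j ("", [], ""))))).map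
          (fun kv => kv.2) := by
        rw [PySem.List.foldl_append_eq_flatMap, List.nil_append, List.map_flatMap]
    _ = ((pvPairs (PySem.List.enumerate rl 0)).filterMap
          (fun pq => pvStepA (rl.length : Int) pq.1 pq.2)).map (fun kv => kv.2) := by
        congr 1
        have hstep : (PySem.List.pyRange 0 (rl.length : Int)).flatMap (fun i =>
            ((PySem.List.enumerate rl 0).drop (i+1).toNat).filterMap
              (fun q => pvStepA (rl.length : Int) (i, PySem.List.pyGetD rl i ("", [], "")) q))
            = (pvPairs (PySem.List.enumerate rl 0)).filterMap
              (fun pq => pvStepA (rl.length : Int) pq.1 pq.2) := by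
          have hlen : ((PySem.List.enumerate rl 0).length : Int) = (rl.length : Int) := by
            rw [PySem.List.length_enumerate]
          rw [← hlen]
          apply pvRangePairs
          intro k hk
          have hk' : k < rl.length := by rwa [PySem.List.length_enumerate] at hk
          rw [PySem.List.pyGetD_natCast, List.getD_eq_getElem _ _ hk',
            PySem.List.getElem_enumerate]
          simp
        rw [← hstep]
        apply pvFlatMap_congr
        intro i hi
        rcases PySem.List.mem_pyRange_one.mp hi with ⟨hi1, _⟩
        exact pvRangeFilterMapIdx rl ("", [], "") _ (i+1) (by omega)

theorem pvA_eq (data : List (String × List (List (String × String)))) :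
    analyze_path_duplicates data
      = ((pvPairs (pvE data)).filterMap (fun pq => pvStepA ((pvRl data).length : Int) pq.1 pq.2)).map
          (fun kv => kv.2) := by
  unfold analyze_path_duplicates
  dsimp only
  rw [PySem.List.foldl_append_singleton_eq_map, List.nil_append]
  exact pvA_loop _

theorem pvB_eq (data : List (String × List (List (String × String)))) :
    analyze_path_duplicates_alt data
      = (PySem.List.sorted
          ((PySem.Set.ofList ((pvE data).map pvHd)).flatMap
            (fun c => ((pvPairs ((pvE data).filter (fun x => pvHd x == c))).filterMap
              (fun pq => pvStepB ((pvRl data).length : Int) pq.1 pq.2))))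
          (fun kv => kv.1)).map (fun kv => kv.2) := by
  unfold analyze_path_duplicates_alt
  dsimp only
  rw [show (PySem.List.enumerate ((PySem.Dict.mk data).getD "routes" []) 0).map
      (fun p => (p.1, pvRouteInfo p.2)) = pvE data from
    (pvEnumerate_map pvRouteInfo ((PySem.Dict.mk data).getD "routes" []) 0).symm]
  have hnodup : ((pvE data).foldl (fun d info => d.modify info.2.2.2 [] (· ++ [info]))
      PySem.Dict.empty).keys.Nodup := by
    apply PySem.Dict.nodup_keys_foldl_modify_key (pvE data) (fun x => x.2.2.2) []
      (fun _ x => (· ++ [x]))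
    simp [PySem.Dict.empty, PySem.Dict.keys]
  have hkeys : ((pvE data).foldl (fun d info => d.modify info.2.2.2 [] (· ++ [info]))
      PySem.Dict.empty).keys = PySem.Set.ofList ((pvE data).map pvHd) := by
    rw [PySem.Dict.keys_foldl_modify_key (pvE data) (fun x => x.2.2.2) [] (fun _ x => (· ++ [x]))]
    rw [show (PySem.Dict.empty : PySem.Dict String (List (Int × String × List String × String))).keys
        = [] from rfl]
    rw [PySem.Set.update_nil_left]
    rfl
  have hgetD : ∀ c : String, ((pvE data).foldl (fun d info => d.modify info.2.2.2 [] (· ++ [info]))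
      PySem.Dict.empty).getD c [] = (pvE data).filter (fun x => pvHd x == c) := by
    intro c
    rw [show (pvE data).foldl (fun d info => d.modify info.2.2.2 [] (· ++ [info])) PySem.Dict.empty
        = ((pvE data).map (fun x => (x.2.2.2, x))).foldl
            (fun d p => d.modify p.1 [] (· ++ [p.2])) PySem.Dict.empty from by
      rw [List.foldl_map]]
    rw [PySem.Dict.getD_foldl_modify_append]
    rw [List.filter_map, List.map_map]
    simp [Function.comp_def, pvHd]
  rw [PySem.Dict.values_eq_map_keys _ hnodup [], hkeys]
  rw [show (PySem.Set.ofList ((pvE data).map pvHd)).map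
        (fun k => ((pvE data).foldl (fun d info => d.modify info.2.2.2 [] (· ++ [info]))
          PySem.Dict.empty).getD k [])
      = (PySem.Set.ofList ((pvE data).map pvHd)).map
        (fun c => (pvE data).filter (fun x => pvHd x == c)) from
    List.map_congr_left (fun c _ => hgetD c)]
  rw [PySem.List.foldl_append_eq_flatMap, List.nil_append, List.flatMap_map]
  have hlen : ((pvE data).length : Int) = ((pvRl data).length : Int) := by
    unfold pvE; rw [PySem.List.length_enumerate]
  rw [hlen]
  congr 1
  congr 1
  apply pvFlatMap_congr
  intro c _
  rw [pvPairsWithin_eq, List.nil_append]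


-- ===== VERDICT (by name: the statement is the Claim_ definition above) =====
theorem pvE_nodup (data : List (String × List (List (String × String)))) : (pvE data).Nodup :=
  (PySem.List.pairwise_lt_enumerate (pvRl data) 0).imp
    (fun {a b} (h : a.1 < b.1) (e : a = b) => absurd (by rw [e]) (ne_of_lt h))

theorem pvE_bounds (data : List (String × List (List (String × String)))) :
    ∀ x ∈ pvE data, 0 ≤ x.1 ∧ x.1 < ((pvRl data).length : Int) := by
  intro x hx
  rcases (PySem.List.mem_enumerate_iff _ _ _).mp hx with ⟨k, hk, rfl⟩
  refine ⟨by simp, ?_⟩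
  simp
  omega

theorem analyze_path_duplicates_spec : Claim_equal_analyze_path_duplicates := by
  intro data _ _
  unfold Spec_analyze_path_duplicates
  rw [pvA_eq, pvB_eq]
  congr 1
  refine (PySem.List.sorted_eq_of_perm_of_pairwise_lt _ _ (fun (kv : Int × (String × String × String × String)) => kv.1) ?_ ?_).symm
  · rw [pvFilterMap_if (fun pq => pvHd pq.1 == pvHd pq.2)
        (fun pq => pvStepA ((pvRl data).length : Int) pq.1 pq.2)
        (fun pq => pvStepB ((pvRl data).length : Int) pq.1 pq.2)
        (pvPairs (pvE data)) (fun pq _ => pvStep_eq _ pq.1 pq.2)]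
    rw [show (PySem.Set.ofList ((pvE data).map pvHd)).flatMap
          (fun c => (pvPairs ((pvE data).filter (fun x => pvHd x == c))).filterMap
            (fun pq => pvStepB ((pvRl data).length : Int) pq.1 pq.2))
        = ((PySem.Set.ofList ((pvE data).map pvHd)).flatMap
            (fun c => pvPairs ((pvE data).filter (fun x => pvHd x == c)))).filterMap
            (fun pq => pvStepB ((pvRl data).length : Int) pq.1 pq.2) from
      (pvFilterMap_flatMap _ _ _).symm]
    exact ((pvPerm pvHd (pvE data) (pvE_nodup data)).symm.filterMap _)
  · apply List.pairwise_filterMap.mpr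
    refine (pvPairwiseKey ((pvRl data).length : Int) (pvE data) (pvE_bounds data)
      (PySem.List.pairwise_lt_enumerate (pvRl data) 0)).imp ?_
    intro p q h kv hkv kv' hkv'
    show kv.1 < kv'.1
    rw [pvStepA_key hkv, pvStepA_key hkv']
    exact h
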